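-- pv_equiv track=rewrite | github.com/EricHuang2FG/ESC180H | Midterms/2023.py | is_almost_symmetric
-- ===== SOURCE A (Python) =====
-- def is_almost_symmetric(M):
--     def is_symmetric(M):
--         for i in range(len(M)):
--             for j in range(len(M[0])):
--                 if M[j][i] != M[i][j]:
--                     return False
--         return True
--
--     for i in range(len(M)):
--         for j in range(len(M[0])):
--             for k in range(len(M)):
--                 for l in range(len(M[0])):
--                     M[i][j], M[k][l] = M[k][l], M[i][j]
--                     if is_symmetric(M):
--                         return True
--                     M[i][j], M[k][l] = M[k][l], M[i][j]
--     return False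
-- ===== SOURCE B (Python) =====
-- def is_almost_symmetric(M):
--     n = len(M)
--     mism = [(i, j) for i in range(n) for j in range(i + 1, n) if M[i][j] != M[j][i]]
--     if len(mism) == 0:
--         return True
--     if len(mism) == 1:
--         (a, b) = mism[0]
--         return any(M[k][k] == M[a][b] or M[k][k] == M[b][a] for k in range(n))
--     if len(mism) != 2:
--         return False
--     (a, b), (c, d) = mism
--     return (M[a][b] == M[d][c] and M[b][a] == M[c][d]) or \
--            (M[a][b] == M[c][d] and M[b][a] == M[d][c])
-- ===== Notes on version B (the rewrite author's own statement) =====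
-- stated objective: faster
-- what changed: A tries every pair of cells (O(n^4) swaps) and rescans the whole matrix after each (O(n^6) total); B makes one O(n^2) pass collecting the mismatched index pairs and decides the answer from at most two of them (0 pairs: symmetric; 1 pair: scan the diagonal for a matching value; 2 pairs: check two cross-equalities; more: impossible).
-- intended difference: On the empty matrix [] A returns False (its loops never run and it falls through) while B returns True, the intended value since the empty matrix is symmetric. — e.g. on is_almost_symmetric([]): A returns false, B returns true
-- outside the precondition, e.g. on is_almost_symmetric([[1, 2], [3, 4], [5, 6]]): A returns False, B raises IndexError; on is_almost_symmetric([[1, 2, 3], [9, 5, 6]]): A returns False, B returns False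
import Mathlib
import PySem

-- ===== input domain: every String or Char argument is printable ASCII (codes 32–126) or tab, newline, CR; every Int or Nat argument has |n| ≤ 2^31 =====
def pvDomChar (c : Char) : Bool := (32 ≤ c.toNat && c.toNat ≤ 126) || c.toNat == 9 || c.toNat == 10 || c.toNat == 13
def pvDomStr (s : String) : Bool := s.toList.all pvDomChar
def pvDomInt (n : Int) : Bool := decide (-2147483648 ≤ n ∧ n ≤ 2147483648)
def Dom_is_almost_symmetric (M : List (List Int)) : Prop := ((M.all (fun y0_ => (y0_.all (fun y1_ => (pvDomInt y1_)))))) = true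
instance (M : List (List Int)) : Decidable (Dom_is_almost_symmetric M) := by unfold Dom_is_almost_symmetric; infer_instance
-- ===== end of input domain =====

-- B replaces A's try-every-swap O(n^6) search by one O(n^2) scan collecting the mismatched
-- index pairs, deciding from at most two of them (plus a diagonal scan) whether one swap can
-- symmetrize the matrix.  Equivalence is about the RETURN value only: Python A mutates M in
-- place and, when it returns True, leaves the successful swap applied; B never mutates M.

-- ===== PORT A =====
-- M[i] / M[i][j]: indices produced by range(...) are in range under Pre_ (square matrix),
-- so reading through .getD (default never used there) and writing through .toNat is exact there.
def pvRow (M : List (List Int)) (i : Int) : List Int := (PySem.List.pyGet? M i).getD []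
def pvG (M : List (List Int)) (i j : Int) : Int := (PySem.List.pyGet? (pvRow M i) j).getD 0
def pvSet (M : List (List Int)) (i j : Int) (v : Int) : List (List Int) :=
  M.set i.toNat ((pvRow M i).set j.toNat v)
-- the simultaneous assignment M[i][j], M[k][l] = M[k][l], M[i][j]: RHS read first, then two stores
def pvSwap (M : List (List Int)) (i j k l : Int) : List (List Int) :=
  pvSet (pvSet M i j (pvG M k l)) k l (pvG M i j)
-- inner helper is_symmetric: 'return False' on first mismatch = .all
def pvIsSym (M : List (List Int)) : Bool :=
  (PySem.List.pyRange 0 (M.length : Int) 1).all fun i =>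
    (PySem.List.pyRange 0 ((pvRow M 0).length : Int) 1).all fun j =>
      pvG M j i == pvG M i j
-- Python swaps in place, tests, and swaps back (an exact restore), so every iteration sees the
-- original M; ported as the pure double-update pvSwap.  'return True' inside the loops = .any.
def is_almost_symmetric (M : List (List Int)) : Bool :=
  (PySem.List.pyRange 0 (M.length : Int) 1).any fun i =>
    (PySem.List.pyRange 0 ((pvRow M 0).length : Int) 1).any fun j =>
      (PySem.List.pyRange 0 (M.length : Int) 1).any fun k =>
        (PySem.List.pyRange 0 ((pvRow M 0).length : Int) 1).any fun l =>
          pvIsSym (pvSwap M i j k l)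

-- ===== PORT B =====
-- the comprehension [(i, j) for i in range(n) for j in range(i+1, n) if M[i][j] != M[j][i]]
def pvMism (M : List (List Int)) : List (Int × Int) :=
  (PySem.List.pyRange 0 (M.length : Int) 1).flatMap fun i =>
    (PySem.List.pyRange (i + 1) (M.length : Int) 1).filterMap fun j =>
      if pvG M i j ≠ pvG M j i then some (i, j) else none
-- Source B's dispatch on len(mism) (0 / 1 / 2 / more) with tuple unpacking = match on the list
def is_almost_symmetric_alt (M : List (List Int)) : Bool :=
  match pvMism M with
  | [] => true
  | [(a, b)] =>
      (PySem.List.pyRange 0 (M.length : Int) 1).any fun k =>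
        pvG M k k == pvG M a b || pvG M k k == pvG M b a
  | [(a, b), (c, d)] =>
      (pvG M a b == pvG M d c && pvG M b a == pvG M c d) ||
      (pvG M a b == pvG M c d && pvG M b a == pvG M d c)
  | _ => false

-- ===== PRECONDITION & SPEC =====
-- Pre_ excludes non-square (incl. ragged) matrices: on those A's scan M[j][i] goes out of range
-- and raises IndexError on almost all of them; on the rest A happens to return False from a
-- partial out-of-order scan, where B's natural n×n scan itself raises IndexError.
def Pre_is_almost_symmetric (M : List (List Int)) : Prop := ∀ r ∈ M, r.length = M.length
instance (M : List (List Int)) : Decidable (Pre_is_almost_symmetric M) := by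
  unfold Pre_is_almost_symmetric; infer_instance
def pvWitness_is_almost_symmetric : List (List Int) := [[1, 2], [3, 4]]

-- On the empty matrix A returns False (its loops never run and it falls through) although the
-- empty matrix is symmetric; B returns True, the intended value.
def D_is_almost_symmetric (M : List (List Int)) : Prop := M = []
instance (M : List (List Int)) : Decidable (D_is_almost_symmetric M) := by
  unfold D_is_almost_symmetric; infer_instance
def Spec_is_almost_symmetric (M : List (List Int)) (out : Bool) : Prop :=
  ¬ D_is_almost_symmetric M → out = is_almost_symmetric_alt M
instance (M : List (List Int)) (out : Bool) : Decidable (Spec_is_almost_symmetric M out) := by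
  unfold Spec_is_almost_symmetric; infer_instance
def pvDiffWitness_is_almost_symmetric : List (List Int) := []
def pvDiffWitnessOut_is_almost_symmetric : Bool × Bool := (false, true)

-- ===== CLAIM (what is proved, stated in full; the proofs are below) =====
def Claim_unchanged_is_almost_symmetric : Prop := ∀ (M : List (List Int)), Dom_is_almost_symmetric M → Pre_is_almost_symmetric M → Spec_is_almost_symmetric M (is_almost_symmetric M)
def Claim_changed_is_almost_symmetric : Prop := Dom_is_almost_symmetric (pvDiffWitness_is_almost_symmetric) ∧ Pre_is_almost_symmetric (pvDiffWitness_is_almost_symmetric) ∧ D_is_almost_symmetric (pvDiffWitness_is_almost_symmetric) ∧ is_almost_symmetric (pvDiffWitness_is_almost_symmetric) = pvDiffWitnessOut_is_almost_symmetric.1 ∧ is_almost_symmetric_alt (pvDiffWitness_is_almost_symmetric) = pvDiffWitnessOut_is_almost_symmetric.2 ∧ pvDiffWitnessOut_is_almost_symmetric.1 ≠ pvDiffWitnessOut_is_almost_symmetric.2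
def Claim_exact_is_almost_symmetric : Prop := ∀ (M : List (List Int)), Dom_is_almost_symmetric M → Pre_is_almost_symmetric M → D_is_almost_symmetric M → is_almost_symmetric M ≠ is_almost_symmetric_alt M

-- ===== LEMMAS AND PROOFS =====

theorem pvRow_natCast (M : List (List Int)) (i : Nat) : pvRow M (i : Int) = M.getD i [] := by
  simp [pvRow, List.getD_eq_getElem?_getD]

theorem getD_pvSet (M : List (List Int)) (i j : Nat) (v : Int) (p : Nat) :
    (pvSet M (i : Int) (j : Int) v).getD p [] =
      if p = i ∧ i < M.length then (M.getD i []).set j v else M.getD p [] := by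
  unfold pvSet
  rw [Int.toNat_natCast, Int.toNat_natCast, pvRow_natCast]
  simp only [List.getD_eq_getElem?_getD, List.getElem?_set]
  split_ifs with h1 h2 h3 h4 h5 h6 h7
  all_goals try rfl
  all_goals try omega
  rw [List.getElem?_eq_none (by omega)]

theorem getD_set_row (r : List Int) (j : Nat) (v : Int) (q : Nat) (hj : j < r.length) :
    (r.set j v).getD q 0 = if q = j then v else r.getD q 0 := by
  rw [List.getD_eq_getElem?_getD, List.getD_eq_getElem?_getD, List.getElem?_set]
  split_ifs with h1 h2 h3
  · rfl
  · omega
  · omega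
  · rfl

def GN (M : List (List Int)) (p q : Nat) : Int := (M.getD p []).getD q 0

def swF (g : Nat → Nat → Int) (i j k l p q : Nat) : Int :=
  if p = k ∧ q = l then g i j else if p = i ∧ q = j then g k l else g p q

theorem pvG_natCast (M : List (List Int)) (i j : Nat) : pvG M (i : Int) (j : Int) = GN M i j := by
  simp [pvG, pvRow_natCast, GN, List.getD_eq_getElem?_getD]

theorem rowlen (M : List (List Int)) (hsq : ∀ r ∈ M, r.length = M.length) (p : Nat)
    (hp : p < M.length) : (M.getD p []).length = M.length := by
  rw [List.getD_eq_getElem?_getD, List.getElem?_eq_getElem hp]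
  exact hsq _ (List.getElem_mem hp)

theorem getD_pvSet' (M : List (List Int)) (i j : Nat) (v : Int) (p : Nat)
    (hi : i < M.length) :
    (pvSet M (i : Int) (j : Int) v).getD p [] =
      if p = i then (M.getD i []).set j v else M.getD p [] := by
  rw [getD_pvSet]
  split_ifs with h1 h2 h3
  · rfl
  · omega
  · omega
  · rfl

theorem GN_swap (M : List (List Int)) (hsq : ∀ r ∈ M, r.length = M.length)
    (i j k l : Nat) (hi : i < M.length) (hj : j < M.length) (hk : k < M.length)
    (hl : l < M.length) (p q : Nat) (hp : p < M.length) (hq : q < M.length) :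
    GN (pvSwap M (i : Int) (j : Int) (k : Int) (l : Int)) p q = swF (GN M) i j k l p q := by
  have hrow := rowlen M hsq
  have hstep : pvSwap M (i : Int) (j : Int) (k : Int) (l : Int)
      = pvSet (pvSet M (i : Int) (j : Int) (GN M k l)) (k : Int) (l : Int) (GN M i j) := by
    rw [pvSwap, pvG_natCast, pvG_natCast]
  rw [hstep]
  have hM1len : ∀ v : Int, (pvSet M (i : Int) (j : Int) v).length = M.length := by
    intro v; simp [pvSet]
  have hM1row : ∀ (v : Int) (x : Nat), x < M.length →
      ((pvSet M (i : Int) (j : Int) v).getD x []).length = M.length := by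
    intro v x hx
    rw [getD_pvSet' _ _ _ _ _ hi]
    split_ifs with h
    · rw [List.length_set]; exact hrow i hi
    · exact hrow x hx
  simp only [GN, swF]
  rw [getD_pvSet' _ _ _ _ _ (by rw [hM1len _]; exact hk)]
  by_cases hpk : p = k
  · rw [if_pos hpk]
    rw [getD_set_row _ _ _ _ (by rw [hM1row _ k hk]; exact hl)]
    by_cases hql : q = l
    · rw [if_pos hql, if_pos ⟨hpk, hql⟩]
    · rw [if_neg hql, if_neg (by omega), getD_pvSet' _ _ _ _ _ hi]
      by_cases hki : k = i
      · rw [if_pos hki]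
        rw [getD_set_row _ _ _ _ (by rw [hrow i hi]; exact hj)]
        by_cases hqj : q = j
        · rw [if_pos hqj, if_pos ⟨by omega, hqj⟩]
        · rw [if_neg hqj, if_neg (by omega), hpk, hki]
      · rw [if_neg hki, if_neg (by omega), hpk]
  · rw [if_neg hpk, getD_pvSet' _ _ _ _ _ hi]
    by_cases hpi : p = i
    · rw [if_pos hpi]
      rw [getD_set_row _ _ _ _ (by rw [hrow i hi]; exact hj)]
      by_cases hqj : q = j
      · rw [if_pos hqj, if_neg (by omega), if_pos ⟨hpi, hqj⟩]
      · rw [if_neg hqj, if_neg (by omega), if_neg (by omega), hpi]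
    · rw [if_neg hpi, if_neg (by omega), if_neg (by omega)]

def symg (g : Nat → Nat → Int) (n : Nat) : Prop := ∀ p q, p < n → q < n → g q p = g p q

theorem pvRow_zero (M : List (List Int)) : pvRow M 0 = M.getD 0 [] := by
  simpa using pvRow_natCast M 0

theorem pvG_cast' (M : List (List Int)) (x y : Int) (hx : 0 ≤ x) (hy : 0 ≤ y) :
    pvG M x y = GN M x.toNat y.toNat := by
  rw [← pvG_natCast, Int.toNat_of_nonneg hx, Int.toNat_of_nonneg hy]

theorem isSym_char (M' : List (List Int)) (c : Nat) (hl : M'.length = c)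
    (hr : 0 < c → (M'.getD 0 []).length = c) :
    pvIsSym M' = true ↔ symg (GN M') c := by
  rcases Nat.eq_zero_or_pos c with h0 | h0
  · subst h0
    constructor
    · intro _ p q hp _; omega
    · intro _
      unfold pvIsSym
      rw [hl]
      rw [show ((0:Nat):Int) = 0 by simp]
      rw [PySem.List.pyRange_one_eq_nil (le_refl 0)]
      rfl
  · have hrow0 : (pvRow M' 0).length = c := by rw [pvRow_zero]; exact hr h0
    unfold pvIsSym symg
    rw [List.all_eq_true]
    constructor
    · intro H p q hp hq
      have h1 := H (p : Int) (by
        rw [PySem.List.mem_pyRange_one]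
        constructor
        · exact Int.natCast_nonneg p
        · rw [hl]; exact_mod_cast hp)
      rw [List.all_eq_true] at h1
      have h2 := h1 (q : Int) (by
        rw [PySem.List.mem_pyRange_one]
        constructor
        · exact Int.natCast_nonneg q
        · rw [hrow0]; exact_mod_cast hq)
      rw [beq_iff_eq, pvG_natCast, pvG_natCast] at h2
      exact h2
    · intro H i hi
      rw [List.all_eq_true]
      intro j hj
      rw [PySem.List.mem_pyRange_one] at hi hj
      rw [beq_iff_eq, pvG_cast' _ _ _ hj.1 hi.1, pvG_cast' _ _ _ hi.1 hj.1]
      exact H i.toNat j.toNat (by omega) (by rw [hrow0] at hj; omega)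

theorem mism_mem (M : List (List Int)) (x y : Int) :
    (x, y) ∈ pvMism M ↔
      ∃ a b : Nat, x = (a : Int) ∧ y = (b : Int) ∧ a < b ∧ b < M.length ∧
        GN M a b ≠ GN M b a := by
  unfold pvMism
  rw [List.mem_flatMap]
  constructor
  · rintro ⟨i, hi, hmem⟩
    rw [List.mem_filterMap] at hmem
    obtain ⟨j, hj, hsome⟩ := hmem
    rw [PySem.List.mem_pyRange_one] at hi hj
    split_ifs at hsome with hne
    · rw [Option.some_inj] at hsome
      obtain ⟨rfl, rfl⟩ := Prod.mk.inj hsome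
      refine ⟨i.toNat, j.toNat, (Int.toNat_of_nonneg (by omega)).symm,
        (Int.toNat_of_nonneg (by omega)).symm, by omega, by omega, ?_⟩
      rw [← pvG_cast' _ _ _ (by omega) (by omega), ← pvG_cast' _ _ _ (by omega) (by omega)]
      exact hne
  · rintro ⟨a, b, rfl, rfl, hab, hb, hne⟩
    refine ⟨(a : Int), ?_, ?_⟩
    · rw [PySem.List.mem_pyRange_one]
      constructor
      · exact Int.natCast_nonneg a
      · exact_mod_cast Nat.lt_of_lt_of_le hab (Nat.le_of_lt_succ (Nat.lt_succ_of_lt hb))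
    · rw [List.mem_filterMap]
      refine ⟨(b : Int), ?_, ?_⟩
      · rw [PySem.List.mem_pyRange_one]
        constructor
        · omega
        · exact_mod_cast hb
      · rw [if_pos]
        rw [pvG_natCast, pvG_natCast]
        exact hne

theorem mism_nodup (M : List (List Int)) : (pvMism M).Nodup := by
  unfold pvMism
  rw [List.nodup_flatMap]
  constructor
  · intro i _
    apply List.Nodup.filterMap
    · intro a a' b hb hb'
      split_ifs at hb hb' <;> simp_all
      exact (Prod.mk.inj (hb.trans hb'.symm)).2
    · exact PySem.List.nodup_pyRange_one _ _
  · apply List.Pairwise.imp ?_ (PySem.List.pairwise_lt_pyRange_one 0 (M.length : Int))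
    intro i i' hlt
    intro s hs hs'
    rw [List.mem_filterMap] at hs hs'
    obtain ⟨j, _, hj⟩ := hs
    obtain ⟨j', _, hj'⟩ := hs'
    split_ifs at hj hj'
    all_goals first
      | (rw [Option.some_inj] at hj hj'
         have hii := (Prod.mk.inj (hj.trans hj'.symm)).1
         omega)
      | simp at hj
      | simp at hj'

theorem length_pvSwap (M : List (List Int)) (i j k l : Int) :
    (pvSwap M i j k l).length = M.length := by
  simp [pvSwap, pvSet]

theorem rowlen_pvSwap (M : List (List Int)) (hsq : ∀ r ∈ M, r.length = M.length)
    (i j k l : Nat) (hi : i < M.length) (hk : k < M.length) (x : Nat) (hx : x < M.length) :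
    ((pvSwap M (i : Int) (j : Int) (k : Int) (l : Int)).getD x []).length = M.length := by
  have hrow := rowlen M hsq
  have hM1row : ∀ (v : Int) (y : Nat), y < M.length →
      ((pvSet M (i : Int) (j : Int) v).getD y []).length = M.length := by
    intro v y hy
    rw [getD_pvSet' _ _ _ _ _ hi]
    split_ifs with h
    · rw [List.length_set]; exact hrow i hi
    · exact hrow y hy
  unfold pvSwap
  rw [getD_pvSet' _ _ _ _ _ (by simp [pvSet]; exact hk)]
  split_ifs with h
  · rw [List.length_set]; exact hM1row _ k hk
  · exact hM1row _ x hx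

theorem symg_congr (g g' : Nat → Nat → Int) (n : Nat)
    (h : ∀ p q, p < n → q < n → g p q = g' p q) : symg g n ↔ symg g' n := by
  unfold symg
  constructor
  · intro H p q hp hq
    rw [← h q p hq hp, ← h p q hp hq]
    exact H p q hp hq
  · intro H p q hp hq
    rw [h q p hq hp, h p q hp hq]
    exact H p q hp hq

theorem A_char (M : List (List Int)) (hsq : ∀ r ∈ M, r.length = M.length) :
    is_almost_symmetric M = true ↔
      ∃ i j k l : Nat, i < M.length ∧ j < M.length ∧ k < M.length ∧ l < M.length ∧
        symg (swF (GN M) i j k l) M.length := by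
  have key : ∀ i j k l : Nat, i < M.length → j < M.length → k < M.length → l < M.length →
      (pvIsSym (pvSwap M (i : Int) (j : Int) (k : Int) (l : Int)) = true ↔
        symg (swF (GN M) i j k l) M.length) := by
    intro i j k l hi hj hk hl
    rw [isSym_char _ M.length (length_pvSwap M _ _ _ _)
      (fun h0 => rowlen_pvSwap M hsq i j k l hi hk 0 h0)]
    exact symg_congr _ _ _ (fun p q hp hq => GN_swap M hsq i j k l hi hj hk hl p q hp hq)
  rcases Nat.eq_zero_or_pos M.length with h0 | h0
  · rw [show is_almost_symmetric M = false by
      unfold is_almost_symmetric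
      rw [h0, show ((0:Nat):Int) = 0 by simp, PySem.List.pyRange_one_eq_nil (le_refl 0)]
      rfl]
    constructor
    · intro h; simp at h
    · rintro ⟨i, j, k, l, hi, _⟩
      exact absurd hi (by omega)
  · have hrow0 : ((pvRow M 0).length : Int) = (M.length : Int) := by
      rw [pvRow_zero, rowlen M hsq 0 h0]
    unfold is_almost_symmetric
    rw [hrow0]
    simp only [List.any_eq_true]
    constructor
    · rintro ⟨i, hi, j, hj, k, hk, l, hl, hsym⟩
      rw [PySem.List.mem_pyRange_one] at hi hj hk hl
      refine ⟨i.toNat, j.toNat, k.toNat, l.toNat, by omega, by omega, by omega, by omega, ?_⟩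
      rw [← key _ _ _ _ (by omega) (by omega) (by omega) (by omega)]
      rw [Int.toNat_of_nonneg hi.1, Int.toNat_of_nonneg hj.1,
        Int.toNat_of_nonneg hk.1, Int.toNat_of_nonneg hl.1]
      exact hsym
    · rintro ⟨i, j, k, l, hi, hj, hk, hl, hsym⟩
      refine ⟨(i : Int), ?_, (j : Int), ?_, (k : Int), ?_, (l : Int), ?_, ?_⟩
      · rw [PySem.List.mem_pyRange_one]; omega
      · rw [PySem.List.mem_pyRange_one]; omega
      · rw [PySem.List.mem_pyRange_one]; omega
      · rw [PySem.List.mem_pyRange_one]; omega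
      · rw [key _ _ _ _ hi hj hk hl]
        exact hsym

theorem swF_comm (g : Nat → Nat → Int) (i j k l p q : Nat) :
    swF g i j k l p q = swF g k l i j p q := by
  unfold swF
  by_cases h1 : p = k ∧ q = l <;> by_cases h2 : p = i ∧ q = j
  · rw [if_pos h1, if_pos h2]
    have e1 : i = k := by omega
    have e2 : j = l := by omega
    rw [e1, e2]
  · rw [if_pos h1, if_neg h2, if_pos h1]
  · rw [if_neg h1, if_pos h2, if_pos h2]
  · rw [if_neg h1, if_neg h2, if_neg h2, if_neg h1]

theorem symg_comm (g : Nat → Nat → Int) (n i j k l : Nat)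
    (H : symg (swF g i j k l) n) : symg (swF g k l i j) n := by
  intro p q hp hq
  calc swF g k l i j q p = swF g i j k l q p := (swF_comm g i j k l q p).symm
    _ = swF g i j k l p q := H p q hp hq
    _ = swF g k l i j p q := swF_comm g i j k l p q

theorem symg_noop (g : Nat → Nat → Int) (n i j : Nat) (hs : symg (swF g i j i j) n) :
    symg g n := by
  intro p q hp hq
  have h := hs p q hp hq
  unfold swF at h
  by_cases h1 : p = i ∧ q = j <;> by_cases h2 : q = i ∧ p = j
  · have hpq : p = q := by omega
    rw [hpq]
  · rw [if_neg h2, if_neg h2, if_pos h1] at h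
    rw [h1.1, h1.2] at h ⊢
    exact h
  · rw [if_pos h2, if_neg h1, if_neg h1] at h
    rw [h2.1, h2.2] at h ⊢
    exact h
  · rw [if_neg h2, if_neg h2, if_neg h1, if_neg h1] at h
    exact h

theorem touch (g : Nat → Nat → Int) (n i j k l : Nat) (hs : symg (swF g i j k l) n)
    (a b : Nat) (ha : a < n) (hb : b < n) (hmis : g a b ≠ g b a) :
    (a = i ∧ b = j) ∨ (b = i ∧ a = j) ∨ (a = k ∧ b = l) ∨ (b = k ∧ a = l) := by
  by_contra hcon
  have h := hs a b ha hb
  unfold swF at h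
  rw [if_neg (by tauto), if_neg (by tauto), if_neg (by tauto), if_neg (by tauto)] at h
  exact hmis h.symm

theorem two_pair_eqs (g : Nat → Nat → Int) (n u1 u2 v1 v2 : Nat)
    (hu1 : u1 < n) (hu2 : u2 < n) (hv1 : v1 < n) (hv2 : v2 < n)
    (hu : u1 ≠ u2) (hv : v1 ≠ v2) (h1 : ¬(u1 = v1 ∧ u2 = v2)) (h2 : ¬(u1 = v2 ∧ u2 = v1))
    (hs : symg (swF g u1 u2 v1 v2) n) :
    g u2 u1 = g v1 v2 ∧ g v2 v1 = g u1 u2 := by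
  have e1 := hs u1 u2 hu1 hu2
  have e2 := hs v1 v2 hv1 hv2
  unfold swF at e1 e2
  rw [if_neg (by omega), if_neg (by omega), if_neg (by omega), if_pos ⟨rfl, rfl⟩] at e1
  rw [if_neg (by omega), if_neg (by omega), if_pos ⟨rfl, rfl⟩] at e2
  exact ⟨e1, e2⟩

theorem sym_swap_two (g : Nat → Nat → Int) (n u1 u2 v1 v2 : Nat)
    (hu : u1 ≠ u2) (hv : v1 ≠ v2) (h1 : ¬(u1 = v1 ∧ u2 = v2)) (h2 : ¬(u1 = v2 ∧ u2 = v1))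
    (e1 : g v1 v2 = g u2 u1) (e2 : g u1 u2 = g v2 v1)
    (hmat : ∀ p q, p ≠ q → p < n → q < n →
      ¬((p = u1 ∧ q = u2) ∨ (p = u2 ∧ q = u1) ∨ (p = v1 ∧ q = v2) ∨ (p = v2 ∧ q = v1)) →
      g p q = g q p) :
    symg (swF g u1 u2 v1 v2) n := by
  intro p q hp hq
  by_cases hpq : p = q
  · rw [hpq]
  · unfold swF
    by_cases c1 : p = u1 ∧ q = u2
    · obtain ⟨rfl, rfl⟩ := c1
      rw [if_neg (by omega), if_neg (by omega), if_neg (by omega), if_pos ⟨rfl, rfl⟩]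
      exact e1.symm
    · by_cases c2 : p = u2 ∧ q = u1
      · obtain ⟨rfl, rfl⟩ := c2
        rw [if_neg (by omega), if_pos ⟨rfl, rfl⟩, if_neg (by omega), if_neg (by omega)]
        exact e1
      · by_cases c3 : p = v1 ∧ q = v2
        · obtain ⟨rfl, rfl⟩ := c3
          rw [if_neg (by omega), if_neg (by omega), if_pos ⟨rfl, rfl⟩]
          exact e2.symm
        · by_cases c4 : p = v2 ∧ q = v1
          · obtain ⟨rfl, rfl⟩ := c4
            rw [if_pos ⟨rfl, rfl⟩, if_neg (by omega), if_neg (by omega)]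
            exact e2
          · rw [if_neg (by omega), if_neg (by omega), if_neg (by omega), if_neg (by omega)]
            exact (hmat p q hpq hp hq (by tauto)).symm

theorem sym_swap_diag (g : Nat → Nat → Int) (n u1 u2 m : Nat) (hu : u1 ≠ u2)
    (e1 : g m m = g u2 u1)
    (hmat : ∀ p q, p ≠ q → p < n → q < n → ¬((p = u1 ∧ q = u2) ∨ (p = u2 ∧ q = u1)) →
      g p q = g q p) :
    symg (swF g u1 u2 m m) n := by
  intro p q hp hq
  by_cases hpq : p = q
  · rw [hpq]
  · unfold swF
    by_cases c1 : p = u1 ∧ q = u2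
    · obtain ⟨rfl, rfl⟩ := c1
      rw [if_neg (by omega), if_neg (by omega), if_neg (by omega), if_pos ⟨rfl, rfl⟩]
      exact e1.symm
    · by_cases c2 : p = u2 ∧ q = u1
      · obtain ⟨rfl, rfl⟩ := c2
        rw [if_neg (by omega), if_pos ⟨rfl, rfl⟩, if_neg (by omega), if_neg (by omega)]
        exact e1
      · rw [if_neg (by omega), if_neg (by omega), if_neg (by omega), if_neg (by omega)]
        exact (hmat p q hpq hp hq (by tauto)).symm

theorem sym_swap_self (g : Nat → Nat → Int) (n : Nat)
    (hmat : ∀ p q, p ≠ q → p < n → q < n → g p q = g q p) :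
    symg (swF g 0 0 0 0) n := by
  intro p q hp hq
  by_cases hpq : p = q
  · rw [hpq]
  · unfold swF
    rw [if_neg (by omega), if_neg (by omega), if_neg (by omega), if_neg (by omega)]
    exact (hmat p q hpq hp hq).symm

theorem aux1 (g : Nat → Nat → Int) (n a b k l : Nat)
    (ha : a < n) (hb : b < n) (hk : k < n) (hl : l < n) (hab : a ≠ b)
    (hmis : g a b ≠ g b a)
    (honly : ∀ x y, x ≠ y → x < n → y < n → g x y ≠ g y x →
      ((x = a ∧ y = b) ∨ (x = b ∧ y = a)))
    (hs : symg (swF g a b k l) n) :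
    ∃ m, m < n ∧ (g m m = g a b ∨ g m m = g b a) := by
  by_cases hkl : k = l
  · subst hkl
    have h := hs a b ha hb
    unfold swF at h
    rw [if_neg (by omega), if_neg (by omega), if_neg (by omega), if_pos ⟨rfl, rfl⟩] at h
    exact ⟨k, hk, Or.inr h.symm⟩
  · by_cases hkab : k = a ∧ l = b
    · have hs' := hs
      rw [hkab.1, hkab.2] at hs'
      exact absurd (symg_noop g n a b hs' a b ha hb).symm hmis
    · by_cases hkba : k = b ∧ l = a
      · have hs' := hs
        rw [hkba.1, hkba.2] at hs'
        have h := hs' a b ha hb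
        unfold swF at h
        rw [if_pos ⟨rfl, rfl⟩, if_neg (by omega), if_pos ⟨rfl, rfl⟩] at h
        exact absurd h hmis
      · have hmkl : g k l = g l k := by
          by_contra hne
          rcases honly k l hkl hk hl hne with ⟨h1', h2'⟩ | ⟨h1', h2'⟩
          · exact hkab ⟨h1', h2'⟩
          · exact hkba ⟨h1', h2'⟩
        have h1 := hs k l hk hl
        have h2 := hs a b ha hb
        unfold swF at h1 h2
        rw [if_neg (by omega), if_neg (by omega), if_pos ⟨rfl, rfl⟩] at h1
        rw [if_neg (by omega), if_neg (by omega), if_neg (by omega), if_pos ⟨rfl, rfl⟩] at h2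
        exact absurd (h2.trans (hmkl.trans h1)).symm hmis

theorem case1 (g : Nat → Nat → Int) (n i j k l a b : Nat)
    (hi : i < n) (hj : j < n) (hk : k < n) (hl : l < n)
    (ha : a < n) (hb : b < n) (hab : a ≠ b) (hmis : g a b ≠ g b a)
    (honly : ∀ x y, x ≠ y → x < n → y < n → g x y ≠ g y x →
      ((x = a ∧ y = b) ∨ (x = b ∧ y = a)))
    (hs : symg (swF g i j k l) n) :
    ∃ m, m < n ∧ (g m m = g a b ∨ g m m = g b a) := by
  have honly' : ∀ x y, x ≠ y → x < n → y < n → g x y ≠ g y x →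
      ((x = b ∧ y = a) ∨ (x = a ∧ y = b)) :=
    fun x y h1 h2 h3 h4 => (honly x y h1 h2 h3 h4).symm
  rcases touch g n i j k l hs a b ha hb hmis with ⟨e1, e2⟩ | ⟨e1, e2⟩ | ⟨e1, e2⟩ | ⟨e1, e2⟩
  · rw [← e1, ← e2] at hs
    exact aux1 g n a b k l ha hb hk hl hab hmis honly hs
  · rw [← e1, ← e2] at hs
    obtain ⟨m, hm, ho⟩ := aux1 g n b a k l hb ha hk hl (Ne.symm hab) (Ne.symm hmis) honly' hs
    exact ⟨m, hm, ho.symm⟩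
  · rw [← e1, ← e2] at hs
    exact aux1 g n a b i j ha hb hi hj hab hmis honly (symg_comm g n i j a b hs)
  · rw [← e1, ← e2] at hs
    obtain ⟨m, hm, ho⟩ := aux1 g n b a i j hb ha hi hj (Ne.symm hab) (Ne.symm hmis) honly'
      (symg_comm g n i j b a hs)
    exact ⟨m, hm, ho.symm⟩

theorem case3 (g : Nat → Nat → Int) (n i j k l a b c d e f : Nat)
    (ha : a < b) (hb : b < n) (hc : c < d) (hd : d < n) (he : e < f) (hf : f < n)
    (hmis1 : g a b ≠ g b a) (hmis2 : g c d ≠ g d c) (hmis3 : g e f ≠ g f e)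
    (h12 : ¬(a = c ∧ b = d)) (h13 : ¬(a = e ∧ b = f)) (h23 : ¬(c = e ∧ d = f))
    (hs : symg (swF g i j k l) n) : False := by
  rcases touch g n i j k l hs a b (by omega) hb hmis1 with T1 | T1 | T1 | T1 <;>
    rcases touch g n i j k l hs c d (by omega) hd hmis2 with T2 | T2 | T2 | T2 <;>
      rcases touch g n i j k l hs e f (by omega) hf hmis3 with T3 | T3 | T3 | T3 <;>
        omega

theorem case2 (g : Nat → Nat → Int) (n i j k l a b c d : Nat)
    (hi : i < n) (hj : j < n) (hk : k < n) (hl : l < n)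
    (hab : a < b) (hb : b < n) (hcd : c < d) (hd : d < n)
    (hmis1 : g a b ≠ g b a) (hmis2 : g c d ≠ g d c)
    (hne : ¬(a = c ∧ b = d))
    (hs : symg (swF g i j k l) n) :
    (g a b = g d c ∧ g b a = g c d) ∨ (g a b = g c d ∧ g b a = g d c) := by
  have ha : a < n := by omega
  have hc : c < n := by omega
  have T1 := touch g n i j k l hs a b ha hb hmis1
  have T2 := touch g n i j k l hs c d hc hd hmis2
  -- if the two swap slots are the same cell, the swap is a no-op and M is symmetric: contra
  by_cases hsame : i = k ∧ j = l
  · have hs' := hs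
    rw [hsame.1, hsame.2] at hs'
    exact absurd (symg_noop g n k l hs' a b ha hb).symm hmis1
  · -- each pair is touched by exactly one slot; derive the equalities by instantiating hs
    rcases T1 with ⟨e1, e2⟩ | ⟨e1, e2⟩ | ⟨e1, e2⟩ | ⟨e1, e2⟩ <;>
      rcases T2 with ⟨f1, f2⟩ | ⟨f1, f2⟩ | ⟨f1, f2⟩ | ⟨f1, f2⟩
    -- T1 slot1 (a,b)=(i,j)
    · exact absurd ⟨by omega, by omega⟩ hne
    · omega
    · -- (c,d)=(k,l)
      rw [← e1, ← e2, ← f1, ← f2] at hs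
      have h := two_pair_eqs g n a b c d ha hb hc hd (by omega) (by omega) (by omega) (by omega) hs
      exact Or.inl ⟨h.2.symm, h.1⟩
    · -- (d,c)=(k,l)
      rw [← e1, ← e2, ← f1, ← f2] at hs
      have h := two_pair_eqs g n a b d c ha hb hd hc (by omega) (by omega) (by omega) (by omega) hs
      exact Or.inr ⟨h.2.symm, h.1⟩
    -- T1 slot1 (b,a)=(i,j)
    · omega
    · exact absurd ⟨by omega, by omega⟩ hne
    · rw [← e1, ← e2, ← f1, ← f2] at hs
      have h := two_pair_eqs g n b a c d hb ha hc hd (by omega) (by omega) (by omega) (by omega) hs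
      exact Or.inr ⟨h.1, h.2.symm⟩
    · rw [← e1, ← e2, ← f1, ← f2] at hs
      have h := two_pair_eqs g n b a d c hb ha hd hc (by omega) (by omega) (by omega) (by omega) hs
      exact Or.inl ⟨h.1, h.2.symm⟩
    -- T1 slot2 (a,b)=(k,l)
    · rw [← e1, ← e2, ← f1, ← f2] at hs
      have h := two_pair_eqs g n c d a b hc hd ha hb (by omega) (by omega) (by omega) (by omega) hs
      exact Or.inl ⟨h.1.symm, h.2⟩
    · rw [← e1, ← e2, ← f1, ← f2] at hs
      have h := two_pair_eqs g n d c a b hd hc ha hb (by omega) (by omega) (by omega) (by omega) hs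
      exact Or.inr ⟨h.1.symm, h.2⟩
    · exact absurd ⟨by omega, by omega⟩ hne
    · omega
    -- T1 slot2 (b,a)=(k,l)
    · rw [← e1, ← e2, ← f1, ← f2] at hs
      have h := two_pair_eqs g n c d b a hc hd hb ha (by omega) (by omega) (by omega) (by omega) hs
      exact Or.inr ⟨h.2, h.1.symm⟩
    · rw [← e1, ← e2, ← f1, ← f2] at hs
      have h := two_pair_eqs g n d c b a hd hc hb ha (by omega) (by omega) (by omega) (by omega) hs
      exact Or.inl ⟨h.2, h.1.symm⟩
    · omega
    · exact absurd ⟨by omega, by omega⟩ hne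

set_option maxHeartbeats 1000000 in

theorem main_eq (M : List (List Int)) (hsq : ∀ r ∈ M, r.length = M.length) (hne : M ≠ []) :
    is_almost_symmetric M = is_almost_symmetric_alt M := by
  have hn : 0 < M.length := List.length_pos_iff.mpr hne
  have hA := A_char M hsq
  have hnd := mism_nodup M
  rw [Bool.eq_iff_iff, hA]
  rcases hm : pvMism M with _ | ⟨⟨x1, x2⟩, _ | ⟨⟨y1, y2⟩, rest⟩⟩
  · -- no mismatch: both sides true
    have hB : is_almost_symmetric_alt M = true := by
      unfold is_almost_symmetric_alt; rw [hm]
    rw [hB]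
    have hmat : ∀ p q, p ≠ q → p < M.length → q < M.length → GN M p q = GN M q p := by
      intro p q hpq hp hq
      by_contra hneq
      rcases Nat.lt_or_ge p q with h | h
      · have : ((p : Int), (q : Int)) ∈ pvMism M :=
          (mism_mem M _ _).mpr ⟨p, q, rfl, rfl, h, hq, hneq⟩
        rw [hm] at this
        simp at this
      · have : ((q : Int), (p : Int)) ∈ pvMism M :=
          (mism_mem M _ _).mpr ⟨q, p, rfl, rfl, by omega, hp, fun h' => hneq h'.symm⟩
        rw [hm] at this
        simp at this
    constructor
    · intro _; rfl
    · intro _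
      exact ⟨0, 0, 0, 0, hn, hn, hn, hn, sym_swap_self (GN M) M.length hmat⟩
  · -- exactly one mismatched pair
    obtain ⟨a, b, hx1, hx2, hab, hbn, hmis⟩ :=
      (mism_mem M x1 x2).mp (by rw [hm]; exact List.mem_singleton_self _)
    subst hx1; subst hx2
    have honly : ∀ x y, x ≠ y → x < M.length → y < M.length → GN M x y ≠ GN M y x →
        ((x = a ∧ y = b) ∨ (x = b ∧ y = a)) := by
      intro x y hxy hx hy hneq
      rcases Nat.lt_or_ge x y with h | h
      · have : ((x : Int), (y : Int)) ∈ pvMism M :=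
          (mism_mem M _ _).mpr ⟨x, y, rfl, rfl, h, hy, hneq⟩
        rw [hm, List.mem_singleton] at this
        obtain ⟨h1, h2⟩ := Prod.mk.inj this
        exact Or.inl ⟨by exact_mod_cast h1, by exact_mod_cast h2⟩
      · have : ((y : Int), (x : Int)) ∈ pvMism M :=
          (mism_mem M _ _).mpr ⟨y, x, rfl, rfl, by omega, hx, fun h' => hneq h'.symm⟩
        rw [hm, List.mem_singleton] at this
        obtain ⟨h1, h2⟩ := Prod.mk.inj this
        exact Or.inr ⟨by exact_mod_cast h2, by exact_mod_cast h1⟩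
    have hB : is_almost_symmetric_alt M = true ↔
        ∃ m : Nat, m < M.length ∧ (GN M m m = GN M a b ∨ GN M m m = GN M b a) := by
      have : is_almost_symmetric_alt M =
          ((PySem.List.pyRange 0 (M.length : Int) 1).any fun k =>
            pvG M k k == pvG M (a : Int) (b : Int) || pvG M k k == pvG M (b : Int) (a : Int)) := by
        unfold is_almost_symmetric_alt; rw [hm]
      rw [this, List.any_eq_true]
      constructor
      · rintro ⟨x, hxmem, hcond⟩
        rw [PySem.List.mem_pyRange_one] at hxmem
        rw [Bool.or_eq_true, beq_iff_eq, beq_iff_eq] at hcond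
        refine ⟨x.toNat, by omega, ?_⟩
        rw [pvG_natCast, pvG_natCast, pvG_cast' _ _ _ (by omega) (by omega)] at hcond
        exact hcond
      · rintro ⟨m, hmn, hcond⟩
        refine ⟨(m : Int), by rw [PySem.List.mem_pyRange_one]; omega, ?_⟩
        rw [Bool.or_eq_true, beq_iff_eq, beq_iff_eq, pvG_natCast, pvG_natCast, pvG_natCast]
        exact hcond
    rw [hB]
    constructor
    · rintro ⟨i, j, k, l, hi, hj, hk, hl, hs⟩
      exact case1 (GN M) M.length i j k l a b hi hj hk hl (by omega) hbn (by omega) hmis honly hs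
    · rintro ⟨m, hmn, hd | hd⟩
      · refine ⟨b, a, m, m, hbn, by omega, hmn, hmn, ?_⟩
        exact sym_swap_diag (GN M) M.length b a m (by omega) hd
          (fun p q h1 h2 h3 h4 => by
            by_contra hneq
            rcases honly p q h1 h2 h3 hneq with ⟨e1, e2⟩ | ⟨e1, e2⟩ <;> omega)
      · refine ⟨a, b, m, m, by omega, hbn, hmn, hmn, ?_⟩
        exact sym_swap_diag (GN M) M.length a b m (by omega) hd
          (fun p q h1 h2 h3 h4 => by
            by_contra hneq
            rcases honly p q h1 h2 h3 hneq with ⟨e1, e2⟩ | ⟨e1, e2⟩ <;> omega)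
  · rcases hr : rest with _ | ⟨z, rest'⟩
    · -- exactly two mismatched pairs
      subst hr
      obtain ⟨a, b, hx1, hx2, hab, hbn, hmis1⟩ :=
        (mism_mem M x1 x2).mp (by rw [hm]; exact List.mem_cons_self ..)
      subst hx1; subst hx2
      obtain ⟨c, d, hy1, hy2, hcd, hdn, hmis2⟩ :=
        (mism_mem M y1 y2).mp (by rw [hm]; exact List.mem_cons_of_mem _ (List.mem_singleton_self _))
      subst hy1; subst hy2
      have hnedup : ¬(a = c ∧ b = d) := by
        rw [hm] at hnd
        rintro ⟨rfl, rfl⟩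
        simp at hnd
      have honly2 : ∀ x y, x ≠ y → x < M.length → y < M.length → GN M x y ≠ GN M y x →
          ((x = a ∧ y = b) ∨ (x = b ∧ y = a) ∨ (x = c ∧ y = d) ∨ (x = d ∧ y = c)) := by
        intro x y hxy hx hy hneq
        rcases Nat.lt_or_ge x y with h | h
        · have : ((x : Int), (y : Int)) ∈ pvMism M :=
            (mism_mem M _ _).mpr ⟨x, y, rfl, rfl, h, hy, hneq⟩
          rw [hm, List.mem_cons, List.mem_singleton] at this
          rcases this with h' | h' <;> obtain ⟨h1, h2⟩ := Prod.mk.inj h'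
          · exact Or.inl ⟨by exact_mod_cast h1, by exact_mod_cast h2⟩
          · exact Or.inr (Or.inr (Or.inl ⟨by exact_mod_cast h1, by exact_mod_cast h2⟩))
        · have : ((y : Int), (x : Int)) ∈ pvMism M :=
            (mism_mem M _ _).mpr ⟨y, x, rfl, rfl, by omega, hx, fun h' => hneq h'.symm⟩
          rw [hm, List.mem_cons, List.mem_singleton] at this
          rcases this with h' | h' <;> obtain ⟨h1, h2⟩ := Prod.mk.inj h'
          · exact Or.inr (Or.inl ⟨by exact_mod_cast h2, by exact_mod_cast h1⟩)
          · exact Or.inr (Or.inr (Or.inr ⟨by exact_mod_cast h2, by exact_mod_cast h1⟩))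
      have hB : is_almost_symmetric_alt M = true ↔
          ((GN M a b = GN M d c ∧ GN M b a = GN M c d) ∨
           (GN M a b = GN M c d ∧ GN M b a = GN M d c)) := by
        have : is_almost_symmetric_alt M =
            ((pvG M (a:Int) (b:Int) == pvG M (d:Int) (c:Int) &&
              pvG M (b:Int) (a:Int) == pvG M (c:Int) (d:Int)) ||
             (pvG M (a:Int) (b:Int) == pvG M (c:Int) (d:Int) &&
              pvG M (b:Int) (a:Int) == pvG M (d:Int) (c:Int))) := by
          unfold is_almost_symmetric_alt; rw [hm]
        rw [this]
        simp only [Bool.or_eq_true, Bool.and_eq_true, beq_iff_eq, pvG_natCast]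
      rw [hB]
      constructor
      · rintro ⟨i, j, k, l, hi, hj, hk, hl, hs⟩
        exact case2 (GN M) M.length i j k l a b c d hi hj hk hl hab hbn hcd hdn
          hmis1 hmis2 hnedup hs
      · rintro (⟨e1, e2⟩ | ⟨e1, e2⟩)
        · refine ⟨b, a, d, c, hbn, by omega, hdn, by omega, ?_⟩
          exact sym_swap_two (GN M) M.length b a d c (by omega) (by omega) (by omega) (by omega)
            (by rw [e1]) (by rw [e2])
            (fun p q h1 h2 h3 h4 => by
              by_contra hneq
              rcases honly2 p q h1 h2 h3 hneq with ⟨g1, g2⟩ | ⟨g1, g2⟩ | ⟨g1, g2⟩ | ⟨g1, g2⟩ <;>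
                omega)
        · refine ⟨a, b, d, c, by omega, hbn, hdn, by omega, ?_⟩
          exact sym_swap_two (GN M) M.length a b d c (by omega) (by omega) (by omega) (by omega)
            (by rw [e2]) (by rw [e1])
            (fun p q h1 h2 h3 h4 => by
              by_contra hneq
              rcases honly2 p q h1 h2 h3 hneq with ⟨g1, g2⟩ | ⟨g1, g2⟩ | ⟨g1, g2⟩ | ⟨g1, g2⟩ <;>
                omega)
    · -- three or more mismatched pairs: both sides false
      subst hr
      have hB : is_almost_symmetric_alt M = false := by
        unfold is_almost_symmetric_alt; rw [hm]
      rw [hB]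
      obtain ⟨a, b, hx1, hx2, hab, hbn, hmis1⟩ :=
        (mism_mem M x1 x2).mp (by rw [hm]; exact List.mem_cons_self ..)
      obtain ⟨c, d, hy1, hy2, hcd, hdn, hmis2⟩ :=
        (mism_mem M y1 y2).mp (by rw [hm]; exact List.mem_cons_of_mem _ (List.mem_cons_self ..))
      obtain ⟨e, f, hz1, hz2, hef, hfn, hmis3⟩ :=
        (mism_mem M z.1 z.2).mp (by
          rw [hm]
          exact List.mem_cons_of_mem _ (List.mem_cons_of_mem _ (List.mem_cons_self ..)))
      rw [hm] at hnd
      have hd12 : ¬(a = c ∧ b = d) := by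
        rintro ⟨rfl, rfl⟩
        have : (x1, x2) = (y1, y2) := by rw [hx1, hx2, hy1, hy2]
        simp [this] at hnd
      have hd13 : ¬(a = e ∧ b = f) := by
        rintro ⟨rfl, rfl⟩
        have : (x1, x2) = (z.1, z.2) := by rw [hx1, hx2, hz1, hz2]
        simp [this] at hnd
      have hd23 : ¬(c = e ∧ d = f) := by
        rintro ⟨rfl, rfl⟩
        have : (y1, y2) = (z.1, z.2) := by rw [hy1, hy2, hz1, hz2]
        simp [this] at hnd
      constructor
      · rintro ⟨i, j, k, l, hi, hj, hk, hl, hs⟩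
        exact absurd (case3 (GN M) M.length i j k l a b c d e f hab hbn hcd hdn hef hfn
          hmis1 hmis2 hmis3 hd12 hd13 hd23 hs) (by simp)
      · intro h; simp at h

-- ===== VERDICT (by name: the statement is the Claim_ definition above) =====
theorem is_almost_symmetric_spec : Claim_unchanged_is_almost_symmetric := by
  intro M _ hpre hd
  exact main_eq M hpre hd

theorem is_almost_symmetric_changed : Claim_changed_is_almost_symmetric := by
  unfold Claim_changed_is_almost_symmetric; decide

theorem is_almost_symmetric_tight : Claim_exact_is_almost_symmetric := by
  intro M _ _ hd
  subst hd; decide
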